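-- pv_equiv track=rewrite | github.com/hyeri-woo/algorithm | python/brute_force/15684_사다리조작/index.py | is_valid_ladder
-- ===== SOURCE A (Python) =====
-- def is_valid_ladder(position):
--     grouped_by_x = {}
--     for x, y, in position:
--         if x not in grouped_by_x:
--             grouped_by_x[x] = set()
--         grouped_by_x[x].add(y)
--
--     for y_values in grouped_by_x.values():
--         for y in y_values:
--             if y + 1 in y_values or y - 1 in y_values:
--                 return False
--     return True
-- ===== SOURCE B (Python) =====
-- def is_valid_ladder(position):
--     rungs = sorted(position)
--     for (x1, y1), (x2, y2) in zip(rungs, rungs[1:]):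
--         if x1 == x2 and y2 - y1 == 1:
--             return False
--     return True
-- ===== Notes on version B (the rewrite author's own statement) =====
-- stated objective: alternative
-- what changed: Replaces the dict-of-sets grouping with y+1/y-1 membership probes by sorting the rungs lexicographically once and scanning consecutive pairs for same column and y-difference exactly 1.
import Mathlib
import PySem

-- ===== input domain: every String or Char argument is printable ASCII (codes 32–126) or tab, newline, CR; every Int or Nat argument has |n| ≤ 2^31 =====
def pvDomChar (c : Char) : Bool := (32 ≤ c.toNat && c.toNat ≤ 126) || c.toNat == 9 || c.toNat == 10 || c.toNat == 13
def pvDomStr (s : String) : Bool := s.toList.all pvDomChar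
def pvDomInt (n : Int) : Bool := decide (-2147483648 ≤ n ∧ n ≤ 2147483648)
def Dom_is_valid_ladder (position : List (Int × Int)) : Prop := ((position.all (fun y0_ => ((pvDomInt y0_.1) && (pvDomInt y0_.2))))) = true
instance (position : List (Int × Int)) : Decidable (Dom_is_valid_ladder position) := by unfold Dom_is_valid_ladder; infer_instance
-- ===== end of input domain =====

-- B replaces A's dict-of-sets grouping (with y+1/y-1 membership probes) by one lexicographic
-- sort followed by a single scan of consecutive pairs; same result, no speed claim.

-- ===== PORT A =====
def is_valid_ladder (position : List (Int × Int)) : Bool :=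
  let grouped := position.foldl (fun d p =>
    let d' := if d.contains p.1 then d else d.insert p.1 (PySem.Set.empty : PySem.Set Int)
    d'.modify p.1 PySem.Set.empty (fun s => PySem.Set.add s p.2)) PySem.Dict.empty
  !(grouped.values.any (fun ys => ys.any (fun y =>
      PySem.Set.contains ys (y + 1) || PySem.Set.contains ys (y - 1))))

-- ===== PORT B =====
def is_valid_ladder_alt (position : List (Int × Int)) : Bool :=
  let rungs := PySem.List.sorted2 position (fun p => p.1) (fun p => p.2) false
  !((rungs.zip (PySem.List.slice rungs (some 1) none)).any (fun ab =>
      ab.1.1 == ab.2.1 && ab.2.2 - ab.1.2 == 1))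

-- ===== PRECONDITION & SPEC =====
def Spec_is_valid_ladder (position : List (Int × Int)) (out : Bool) : Prop := out = is_valid_ladder_alt position
instance (position : List (Int × Int)) (out : Bool) : Decidable (Spec_is_valid_ladder position out) := by unfold Spec_is_valid_ladder; infer_instance

-- ===== CLAIM (what is proved, stated in full; the proofs are below) =====
def Claim_equal_is_valid_ladder : Prop := ∀ (position : List (Int × Int)), Dom_is_valid_ladder position → Spec_is_valid_ladder position (is_valid_ladder position)

-- ===== LEMMAS AND PROOFS =====

-- common characterisation: some column holds two rungs at adjacent rows
def AdjProp (position : List (Int × Int)) : Prop :=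
  ∃ x y : Int, (x, y) ∈ position ∧ (x, y + 1) ∈ position

-- ---------- A side ----------

-- one iteration of A's grouping loop
def stepA (d : PySem.Dict Int (PySem.Set Int)) (p : Int × Int) : PySem.Dict Int (PySem.Set Int) :=
  let d' := if d.contains p.1 then d else d.insert p.1 (PySem.Set.empty : PySem.Set Int)
  d'.modify p.1 PySem.Set.empty (fun s => PySem.Set.add s p.2)

lemma stepA_getD (d : PySem.Dict Int (PySem.Set Int)) (p : Int × Int) (x : Int) :
    (stepA d p).getD x PySem.Set.empty =
      if x = p.1 then PySem.Set.add (d.getD p.1 PySem.Set.empty) p.2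
      else d.getD x PySem.Set.empty := by
  by_cases hc : d.contains p.1 = true <;>
    by_cases h : x = p.1 <;>
      simp [stepA, hc, h, PySem.Dict.getD_modify, PySem.Dict.getD_insert_self,
        PySem.Dict.getD_insert_of_ne, PySem.Dict.getD_of_not_contains]

lemma stepA_keys (d : PySem.Dict Int (PySem.Set Int)) (p : Int × Int) :
    (stepA d p).keys = if d.contains p.1 then d.keys else d.keys ++ [p.1] := by
  by_cases hc : d.contains p.1 = true <;>
    simp [stepA, hc, PySem.Dict.keys_modify, PySem.Dict.insert_insert_self,
      PySem.Dict.keys_insert_of_contains, PySem.Dict.keys_insert_of_not_contains]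

lemma foldA_getD_mem (l : List (Int × Int)) (d : PySem.Dict Int (PySem.Set Int)) (x y : Int) :
    y ∈ (l.foldl stepA d).getD x PySem.Set.empty ↔
      y ∈ d.getD x PySem.Set.empty ∨ (x, y) ∈ l := by
  induction l generalizing d with
  | nil => simp
  | cons p l ih =>
    rw [List.foldl_cons, ih, stepA_getD]
    by_cases h : x = p.1
    · subst h
      simp [PySem.Set.mem_add, Prod.ext_iff]
      tauto
    · simp [h, Prod.ext_iff]

lemma foldA_mem_keys (l : List (Int × Int)) (d : PySem.Dict Int (PySem.Set Int)) (x : Int) :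
    x ∈ (l.foldl stepA d).keys ↔ x ∈ d.keys ∨ ∃ y, (x, y) ∈ l := by
  induction l generalizing d with
  | nil => simp
  | cons p l ih =>
    rw [List.foldl_cons, ih]
    have hk : x ∈ (stepA d p).keys ↔ x ∈ d.keys ∨ x = p.1 := by
      rw [stepA_keys]
      split_ifs with hc
      · simp only [iff_self_or]
        rintro rfl
        exact (PySem.Dict.contains_iff_mem_keys _ _).mp hc
      · simp
    rw [hk]
    constructor
    · rintro ((h | rfl) | ⟨y, hy⟩)
      · exact Or.inl h
      · exact Or.inr ⟨p.2, List.mem_cons_self ..⟩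
      · exact Or.inr ⟨y, List.mem_cons_of_mem _ hy⟩
    · rintro (h | ⟨y, hy⟩)
      · exact Or.inl (Or.inl h)
      · rcases List.mem_cons.mp hy with h | h
        · exact Or.inl (Or.inr (congrArg Prod.fst h))
        · exact Or.inr ⟨y, h⟩

lemma foldA_nodup_keys (l : List (Int × Int)) (d : PySem.Dict Int (PySem.Set Int))
    (h : d.keys.Nodup) : (l.foldl stepA d).keys.Nodup := by
  induction l generalizing d with
  | nil => exact h
  | cons p l ih =>
    rw [List.foldl_cons]
    refine ih _ ?_
    rw [stepA_keys]
    split_ifs with hc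
    · exact h
    · have hnm : p.1 ∉ d.keys := fun hm => hc ((PySem.Dict.contains_iff_mem_keys _ _).mpr hm)
      simp only [List.nodup_append, List.nodup_cons, List.nodup_nil]
      constructor
      · exact h
      constructor
      · simp
      · intro a ha b hb
        simp only [List.mem_singleton] at hb
        subst hb
        exact fun he => hnm (he ▸ ha)

lemma portA_false_iff (position : List (Int × Int)) :
    is_valid_ladder position = false ↔ AdjProp position := by
  have hfold : is_valid_ladder position =
      !((position.foldl stepA PySem.Dict.empty).values.any (fun ys => ys.any (fun y =>
        PySem.Set.contains ys (y + 1) || PySem.Set.contains ys (y - 1)))) := rfl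
  set g := position.foldl stepA PySem.Dict.empty with hg
  have hnd : g.keys.Nodup := foldA_nodup_keys _ _ (by simp)
  rw [hfold, Bool.not_eq_false', PySem.Dict.values_eq_map_keys g hnd PySem.Set.empty,
    List.any_map]
  simp only [List.any_eq_true, Function.comp_apply, Bool.or_eq_true,
    PySem.Set.contains_iff]
  constructor
  · rintro ⟨k, hk, y, hy, hadj⟩
    rw [foldA_getD_mem, PySem.Dict.getD_empty] at hy
    rcases hy with hy | hy
    · simp at hy
    rcases hadj with hadj | hadj <;>
      rw [foldA_getD_mem, PySem.Dict.getD_empty] at hadj <;>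
      rcases hadj with h' | h'
    · simp at h'
    · exact ⟨k, y, hy, h'⟩
    · simp at h'
    · exact ⟨k, y - 1, h', by simpa using hy⟩
  · rintro ⟨x, y, h1, h2⟩
    refine ⟨x, ?_, y, ?_, Or.inl ?_⟩
    · rw [foldA_mem_keys]
      exact Or.inr ⟨y, h1⟩
    · rw [foldA_getD_mem]
      exact Or.inr h1
    · rw [foldA_getD_mem]
      exact Or.inr h2

-- ---------- B side ----------

-- lexicographic ≤ on rungs (Python's tuple order)
def lexLE (a b : Int × Int) : Prop := a.1 < b.1 ∨ (a.1 = b.1 ∧ a.2 ≤ b.2)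

-- the strict-lex comparison sorted2 inserts by
def bfB (a b : Int × Int) : Bool :=
  decide (a.1 < b.1) || !decide (b.1 < a.1) && decide (a.2 < b.2)

lemma lexLE_of_bfB {a b : Int × Int} (h : bfB a b = true) : lexLE a b := by
  simp only [bfB, Bool.or_eq_true, Bool.and_eq_true, Bool.not_eq_true',
    decide_eq_true_eq, decide_eq_false_iff_not] at h
  unfold lexLE; omega

lemma lexLE_of_not_bfB {a b : Int × Int} (h : bfB a b = false) : lexLE b a := by
  simp only [bfB, Bool.or_eq_false_iff, Bool.and_eq_false_iff, Bool.not_eq_false',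
    decide_eq_true_eq, decide_eq_false_iff_not] at h
  unfold lexLE; omega

lemma lexLE_trans {a b c : Int × Int} (h1 : lexLE a b) (h2 : lexLE b c) : lexLE a c := by
  unfold lexLE at *; omega

lemma insertBy_pairwise_lex (x : Int × Int) (ys : List (Int × Int)) (h : ys.Pairwise lexLE) :
    (PySem.List.insertBy bfB x ys).Pairwise lexLE := by
  induction ys with
  | nil => simp [PySem.List.insertBy]
  | cons y ys ih =>
    rw [List.pairwise_cons] at h
    obtain ⟨hy, hys⟩ := h
    by_cases hb : bfB x y = true
    · rw [show PySem.List.insertBy bfB x (y :: ys) = x :: y :: ys by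
        simp [PySem.List.insertBy, hb]]
      refine List.Pairwise.cons ?_ (List.Pairwise.cons hy hys)
      intro z hz
      rcases List.mem_cons.mp hz with rfl | hz
      · exact lexLE_of_bfB hb
      · exact lexLE_trans (lexLE_of_bfB hb) (hy _ hz)
    · rw [show PySem.List.insertBy bfB x (y :: ys) = y :: PySem.List.insertBy bfB x ys by
        simp [PySem.List.insertBy, hb]]
      refine List.Pairwise.cons ?_ (ih hys)
      intro z hz
      rcases (PySem.List.mem_insertBy _ _ _ _).mp hz with rfl | hz
      · exact lexLE_of_not_bfB (Bool.not_eq_true _ ▸ hb)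
      · exact hy _ hz

lemma foldl_insertBy_pairwise_lex (l : List (Int × Int)) (acc : List (Int × Int))
    (h : acc.Pairwise lexLE) :
    (l.foldl (fun acc x => PySem.List.insertBy bfB x acc) acc).Pairwise lexLE := by
  induction l generalizing acc with
  | nil => exact h
  | cons p l ih => exact ih _ (insertBy_pairwise_lex _ _ h)

lemma sorted2_pairwise_lex (position : List (Int × Int)) :
    (PySem.List.sorted2 position (fun p => p.1) (fun p => p.2) false).Pairwise lexLE := by
  have he : PySem.List.sorted2 position (fun p => p.1) (fun p => p.2) false =
      position.foldl (fun acc x => PySem.List.insertBy bfB x acc) [] := rfl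
  rw [he]
  exact foldl_insertBy_pairwise_lex _ _ (by simp)

-- in a lex-sorted list two same-column rungs at rows y and y+1 force an adjacent such pair
lemma adj_pair_of_members (rs : List (Int × Int)) (h : rs.Pairwise lexLE) (x y : Int)
    (ha : (x, y) ∈ rs) (hb : (x, y + 1) ∈ rs) :
    ∃ ab ∈ rs.zip rs.tail, ab.1.1 = ab.2.1 ∧ ab.2.2 - ab.1.2 = 1 := by
  induction rs with
  | nil => simp at ha
  | cons p rest ih =>
    rw [List.pairwise_cons] at h
    obtain ⟨hp, hrest⟩ := h
    by_cases hA : (x, y) ∈ rest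
    · by_cases hB : (x, y + 1) ∈ rest
      · obtain ⟨ab, hab, hcond⟩ := ih hrest hA hB
        refine ⟨ab, ?_, hcond⟩
        cases rest with
        | nil => simp at hab
        | cons q rest' =>
          simp only [List.tail_cons] at hab ⊢
          rw [List.zip_cons_cons]
          exact List.mem_cons_of_mem _ hab
      · have hpb : p = (x, y + 1) := by
          rcases List.mem_cons.mp hb with h' | h'
          · exact h'.symm
          · exact absurd h' hB
        have := hp _ hA
        rw [hpb] at this
        unfold lexLE at this
        simp at this
    · have hpa : p = (x, y) := by
        rcases List.mem_cons.mp ha with h' | h'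
        · exact h'.symm
        · exact absurd h' hA
      have hbrest : (x, y + 1) ∈ rest := by
        rcases List.mem_cons.mp hb with h' | h'
        · rw [hpa] at h'; simp at h'
        · exact h'
      cases rest with
      | nil => simp at hbrest
      | cons q rest' =>
        by_cases hq : q = (x, y + 1)
        · refine ⟨(p, q), ?_, ?_⟩
          · simp [List.zip_cons_cons]
          · rw [hpa, hq]
            refine ⟨rfl, ?_⟩
            show y + 1 - y = 1
            omega
        · have hq1 : lexLE p q := hp _ (List.mem_cons_self ..)
          rw [List.pairwise_cons] at hrest
          obtain ⟨hq2, hrest'⟩ := hrest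
          have hbq : (x, y + 1) ∈ rest' := by
            rcases List.mem_cons.mp hbrest with h' | h'
            · exact absurd h'.symm hq
            · exact h'
          have hq3 : lexLE q (x, y + 1) := hq2 _ hbq
          have hqx : q.1 = x ∧ q.2 = y ∨ q.1 = x ∧ q.2 = y + 1 := by
            rw [hpa] at hq1
            unfold lexLE at hq1 hq3
            simp at hq1 hq3
            omega
          rcases hqx with ⟨hx1, hx2⟩ | ⟨hx1, hx2⟩
          · have hqv : q = (x, y) := Prod.ext hx1 hx2
            have hrec := ih (List.pairwise_cons.mpr ⟨hq2, hrest'⟩)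
              (hqv ▸ List.mem_cons_self ..) hbrest
            obtain ⟨ab, hab, hcond⟩ := hrec
            refine ⟨ab, ?_, hcond⟩
            simp only [List.tail_cons] at hab ⊢
            rw [List.zip_cons_cons]
            exact List.mem_cons_of_mem _ hab
          · exact absurd (Prod.ext hx1 hx2) hq

lemma portB_false_iff (position : List (Int × Int)) :
    is_valid_ladder_alt position = false ↔ AdjProp position := by
  unfold is_valid_ladder_alt
  set rs := PySem.List.sorted2 position (fun p => p.1) (fun p => p.2) false with hrs
  have hperm : rs.Perm position := PySem.List.sorted2_perm ..
  have hpw : rs.Pairwise lexLE := sorted2_pairwise_lex position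
  show (!(rs.zip (PySem.List.slice rs (some 1) none)).any fun ab =>
      ab.1.1 == ab.2.1 && ab.2.2 - ab.1.2 == 1) = false ↔ AdjProp position
  rw [PySem.List.slice_from_one, Bool.not_eq_false', List.any_eq_true]
  constructor
  · rintro ⟨ab, hab, hcond⟩
    simp only [Bool.and_eq_true, beq_iff_eq] at hcond
    obtain ⟨h1, h2⟩ := hcond
    have hm1 : ab.1 ∈ rs := (List.of_mem_zip hab).1
    have hm2 : ab.2 ∈ rs := List.mem_of_mem_tail (List.of_mem_zip hab).2
    refine ⟨ab.1.1, ab.1.2, hperm.mem_iff.mp (by simpa using hm1), ?_⟩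
    have : ab.2 = (ab.1.1, ab.1.2 + 1) := by
      ext
      · exact h1.symm
      · omega
    rw [← this]
    exact hperm.mem_iff.mp hm2
  · rintro ⟨x, y, h1, h2⟩
    obtain ⟨ab, hab, hcond⟩ := adj_pair_of_members rs hpw x y
      (hperm.mem_iff.mpr h1) (hperm.mem_iff.mpr h2)
    exact ⟨ab, hab, by simp [hcond.1, hcond.2]⟩

-- ===== VERDICT (by name: the statement is the Claim_ definition above) =====
theorem is_valid_ladder_spec : Claim_equal_is_valid_ladder := by
  intro position _
  unfold Spec_is_valid_ladder
  by_cases h : AdjProp position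
  · rw [(portA_false_iff position).mpr h, (portB_false_iff position).mpr h]
  · cases hA : is_valid_ladder position with
    | false => exact absurd ((portA_false_iff position).mp hA) h
    | true =>
      cases hB : is_valid_ladder_alt position with
      | false => exact absurd ((portB_false_iff position).mp hB) h
      | true => rfl
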